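-- pv_equiv track=rewrite | github.com/solovevalex/Lab_helper | view_change.py | rung_figure
-- ===== SOURCE A (Python) =====
-- def rung_figure(figure):
--     n = 0
--     figure_work = figure.__str__()
--     try:
--         flag = figure_work.index(',')
--     except ValueError:
--         flag = figure_work.index('.')
--     if flag == 1:
--         for i in range(len(figure_work)):
--             if figure_work[i] == '0':
--                 n += 1
--             elif figure_work[i] == ',' or figure_work[i] == '.':
--                 pass
--             elif figure_work[i] != '0':
--                 break
--     else:
--         n = -flag
--     return n
-- ===== SOURCE B (Python) =====
-- def _count(s):
--     # recursive leading-run count: '0' adds one, a separator is transparent,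
--     # anything else (or the end) stops the run
--     if not s:
--         return 0
--     c = s[0]
--     if c == '0':
--         return 1 + _count(s[1:])
--     if c == ',' or c == '.':
--         return _count(s[1:])
--     return 0
--
-- def rung_figure(figure):
--     s = figure.__str__()
--     flag = s.index(',') if ',' in s else s.index('.')
--     if flag != 1:
--         return -flag
--     return _count(s)
-- ===== Notes on version B (the rewrite author's own statement) =====
-- stated objective: alternative
-- what changed: Replaces A's stateful iterative loop (accumulator n, pass/break control flow) by a structural recursion on the string that returns 1 + recurse on '0', recurses transparently on a separator, and stops otherwise; the separator index is found by a membership test instead of try/except.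
import Mathlib
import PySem

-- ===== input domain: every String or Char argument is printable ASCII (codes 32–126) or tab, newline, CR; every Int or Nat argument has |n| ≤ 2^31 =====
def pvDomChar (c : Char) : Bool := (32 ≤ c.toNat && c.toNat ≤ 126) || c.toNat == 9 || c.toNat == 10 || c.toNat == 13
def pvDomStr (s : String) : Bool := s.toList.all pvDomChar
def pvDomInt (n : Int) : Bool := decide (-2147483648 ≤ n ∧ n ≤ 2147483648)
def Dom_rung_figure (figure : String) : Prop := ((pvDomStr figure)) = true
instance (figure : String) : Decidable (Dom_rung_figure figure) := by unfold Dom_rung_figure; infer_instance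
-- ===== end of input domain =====

-- B replaces A's stateful counting loop (accumulator, pass/break) by a structural recursion
-- returning 1 + recurse on '0' (objective: alternative). A = B on Pre_ (some separator present).

-- ===== PORT A =====
-- A's try: s.index(',') except ValueError: s.index('.') — first try ',', fall back to '.'.
def rungFlagA (l : List Char) : Option Nat :=
  match PySem.List.index? l ',' with
  | some k => some k
  | none => PySem.List.index? l '.'

-- A's for-loop over the characters: count '0' into the accumulator, skip ',' '.', break otherwise.
def rungLoopA : List Char → Int → Int
  | [], n => n
  | c :: rest, n =>
    if c = '0' then rungLoopA rest (n + 1)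
    else if c = ',' ∨ c = '.' then rungLoopA rest n
    else n

def rung_figure (figure : String) : Int :=
  let l := figure.toList
  match rungFlagA l with
  | none => 0   -- unreachable under Pre_: Python raises ValueError here
  | some flag => if flag = 1 then rungLoopA l 0 else -(flag : Int)

-- ===== PORT B =====
-- B's recursive helper _count: 1 + recurse on '0', transparent on separators, 0 otherwise.
def rungCountB : List Char → Int
  | [] => 0
  | c :: rest =>
    if c = '0' then 1 + rungCountB rest
    else if c = ',' ∨ c = '.' then rungCountB rest
    else 0

def rung_figure_alt (figure : String) : Int :=
  let l := figure.toList
  let flag? := if l.contains ',' then PySem.List.index? l ',' else PySem.List.index? l '.'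
  match flag? with
  | none => 0   -- unreachable under Pre_: Python raises ValueError here
  | some flag => if flag ≠ 1 then -(flag : Int) else rungCountB l

-- ===== PRECONDITION & SPEC =====
-- Pre_ excludes exactly the strings containing neither ',' nor '.', on which A raises ValueError.
def Pre_rung_figure (figure : String) : Prop :=
  ',' ∈ figure.toList ∨ '.' ∈ figure.toList
instance (figure : String) : Decidable (Pre_rung_figure figure) := by
  unfold Pre_rung_figure; infer_instance

def pvWitness_rung_figure : String := "0.0012"

def Spec_rung_figure (figure : String) (out : Int) : Prop := out = rung_figure_alt figure
instance (figure : String) (out : Int) : Decidable (Spec_rung_figure figure out) := by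
  unfold Spec_rung_figure; infer_instance

-- ===== CLAIM (what is proved, stated in full; the proofs are below) =====
def Claim_equal_rung_figure : Prop :=
  ∀ (figure : String), Dom_rung_figure figure → Pre_rung_figure figure →
    Spec_rung_figure figure (rung_figure figure)

-- ===== LEMMAS AND PROOFS =====

-- A's flag and B's flag are the same option value.
theorem rungFlag_eq (l : List Char) :
    rungFlagA l = (if l.contains ',' then PySem.List.index? l ',' else PySem.List.index? l '.') := by
  unfold rungFlagA
  by_cases h : ',' ∈ l
  · have hs := (PySem.List.index?_isSome_iff l ',').2 h
    rw [if_pos (by simpa using h)]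
    cases hk : PySem.List.index? l ',' with
    | none => rw [hk] at hs; simp at hs
    | some k => rfl
  · have hn : PySem.List.index? l ',' = none := (PySem.List.index?_eq_none_iff l ',').2 h
    rw [if_neg (by simpa using h), hn]

-- A's accumulator loop equals B's structural recursion, for any accumulator.
theorem rungLoop_eq (l : List Char) : ∀ n : Int, rungLoopA l n = n + rungCountB l := by
  induction l with
  | nil => intro n; simp [rungLoopA, rungCountB]
  | cons c rest ih =>
    intro n
    by_cases h0 : c = '0'
    · simp only [rungLoopA, rungCountB, if_pos h0]
      rw [ih (n + 1)]; ring
    · by_cases hsep : c = ',' ∨ c = '.'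
      · simp only [rungLoopA, rungCountB, if_neg h0, if_pos hsep]
        exact ih n
      · simp only [rungLoopA, rungCountB, if_neg h0, if_neg hsep]
        ring

-- ===== VERDICT (by name: the statement is the Claim_ definition above) =====
theorem rung_figure_spec : Claim_equal_rung_figure := by
  intro figure _ hpre
  unfold Spec_rung_figure rung_figure rung_figure_alt
  simp only [rungFlag_eq]
  cases hf : (if figure.toList.contains ',' then PySem.List.index? figure.toList ','
              else PySem.List.index? figure.toList '.') with
  | none =>
    exfalso
    by_cases hc : ',' ∈ figure.toList
    · rw [if_pos (by simpa using hc)] at hf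
      have := (PySem.List.index?_isSome_iff figure.toList ',').2 hc
      rw [hf] at this; simp at this
    · rw [if_neg (by simpa using hc)] at hf
      have hd : '.' ∈ figure.toList := by
        rcases hpre with h | h
        · exact absurd h hc
        · exact h
      have := (PySem.List.index?_isSome_iff figure.toList '.').2 hd
      rw [hf] at this; simp at this
  | some flag =>
    by_cases h1 : flag = 1
    · simp only [h1, ne_eq, not_true_eq_false, if_false]
      rw [rungLoop_eq]; simp
    · simp [h1]
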